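-- pv_equiv track=rewrite | github.com/lamartine-sl/public | golf_press_project.py | calc_press_pairs
-- ===== SOURCE A (Python) =====
-- def calc_press_pairs(p1,p2,p3,p4):
--     games = [0]
--     result_pair = [0 if p1 + p2 == p3 + p4 else 1 if p1 + p2 < p3 + p4 else -1 for p1, p2, p3,p4 in zip(p1,p2,p3,p4)]
--     result_best_score = [0 if min(p1,p2) == min(p3,p4) else 1 if min(p1,p2) < min(p3,p4) else -1 for p1, p2, p3,p4 in zip(p1,p2,p3,p4)]
--     for x,y in zip(result_pair, result_best_score):
--         games = [x + z for z in games]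
--         if abs(games[len(games)-1]) > 3:
--             games += [0]
--         games = [y + z for z in games]
--         if abs(games[len(games)-1]) > 3:
--             games += [0]
--
--     return games
-- ===== SOURCE B (Python) =====
-- def calc_press_pairs(p1, p2, p3, p4):
--     # O(n): keep one running sum S and, per created game, the value of S at its
--     # creation; each game's current score is S minus its creation offset.
--     def cmp(a, b):
--         return 0 if a == b else 1 if a < b else -1
--     S = 0
--     offsets = [0]
--     for a, b, c, d in zip(p1, p2, p3, p4):
--         for inc in (cmp(a + b, c + d), cmp(min(a, b), min(c, d))):
--             S += inc
--             if abs(S - offsets[-1]) > 3: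
--                 offsets.append(S)
--     return [S - off for off in offsets]
-- ===== Notes on version B (the rewrite author's own statement) =====
-- stated objective: faster
-- what changed: Instead of rewriting the whole growing games list on every step (quadratic), B keeps one running sum S plus each game's creation offset and reconstructs all scores as S - offset in a single final pass.
import Mathlib
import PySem

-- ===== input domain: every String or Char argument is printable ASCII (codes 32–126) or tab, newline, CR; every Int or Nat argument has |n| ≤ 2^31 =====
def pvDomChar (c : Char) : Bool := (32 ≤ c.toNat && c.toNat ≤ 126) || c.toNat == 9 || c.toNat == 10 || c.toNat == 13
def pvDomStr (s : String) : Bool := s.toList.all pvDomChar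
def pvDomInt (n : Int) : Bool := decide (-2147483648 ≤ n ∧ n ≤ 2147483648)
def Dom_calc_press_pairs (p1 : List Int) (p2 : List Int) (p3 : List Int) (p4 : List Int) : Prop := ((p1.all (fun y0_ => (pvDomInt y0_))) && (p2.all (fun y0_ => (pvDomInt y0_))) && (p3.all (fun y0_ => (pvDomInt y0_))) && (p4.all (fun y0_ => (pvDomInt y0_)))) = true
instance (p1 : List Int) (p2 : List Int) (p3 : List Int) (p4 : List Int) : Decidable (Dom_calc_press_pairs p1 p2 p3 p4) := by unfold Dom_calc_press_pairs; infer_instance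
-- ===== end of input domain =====

-- B replaces A's repeated rewriting of the whole games list by one running sum plus
-- per-game creation offsets, reconstructed in a final pass (objective: faster, O(n) vs O(n^2)).

-- ===== PORT A =====
-- zip(p1,p2,p3,p4): nested zips truncate to the common length, like Python's zip
def pvZip4 (p1 p2 p3 p4 : List Int) : List (Int × Int × Int × Int) :=
  p1.zip (p2.zip (p3.zip p4))

-- one stage of A's loop body (done once with x, once with y):
--   games = [i + z for z in games]; if abs(games[len(games)-1]) > 3: games += [0]
-- games is never empty (it starts as [0] and only grows), so games[len(games)-1]
-- is its last element; ported as getLast?.getD 0 (the default is never used).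
def pvStageA (i : Int) (games : List Int) : List Int :=
  let g := games.map (fun z => i + z)
  if 3 < |g.getLast?.getD 0| then g ++ [0] else g

def calc_press_pairs (p1 : List Int) (p2 : List Int) (p3 : List Int) (p4 : List Int) : List Int :=
  let z := pvZip4 p1 p2 p3 p4
  let result_pair := z.map (fun (a, b, c, d) =>
    if a + b = c + d then 0 else if a + b < c + d then 1 else -1)
  let result_best_score := z.map (fun (a, b, c, d) =>
    if min a b = min c d then 0 else if min a b < min c d then 1 else -1)
  (result_pair.zip result_best_score).foldl
    (fun games xy => pvStageA xy.2 (pvStageA xy.1 games)) [0]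

-- ===== PORT B =====
-- Source B's cmp helper
def pvCmp (a b : Int) : Int := if a = b then 0 else if a < b then 1 else -1

-- one increment of Source B's inner loop: S += inc; if abs(S - offsets[-1]) > 3: offsets.append(S)
-- offsets is never empty (starts as [0]), so offsets[-1] is ported as getLast?.getD 0.
def pvStageB (inc : Int) (st : Int × List Int) : Int × List Int :=
  let S := st.1 + inc
  if 3 < |S - st.2.getLast?.getD 0| then (S, st.2 ++ [S]) else (S, st.2)

def calc_press_pairs_alt (p1 : List Int) (p2 : List Int) (p3 : List Int) (p4 : List Int) : List Int :=
  let st := (pvZip4 p1 p2 p3 p4).foldl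
    (fun st q =>
      pvStageB (pvCmp (min q.1 q.2.1) (min q.2.2.1 q.2.2.2))
        (pvStageB (pvCmp (q.1 + q.2.1) (q.2.2.1 + q.2.2.2)) st))
    (0, [0])
  st.2.map (fun off => st.1 - off)

-- ===== PRECONDITION & SPEC =====
def Spec_calc_press_pairs (p1 : List Int) (p2 : List Int) (p3 : List Int) (p4 : List Int) (out : List Int) : Prop := out = calc_press_pairs_alt p1 p2 p3 p4
instance (p1 : List Int) (p2 : List Int) (p3 : List Int) (p4 : List Int) (out : List Int) : Decidable (Spec_calc_press_pairs p1 p2 p3 p4 out) := by unfold Spec_calc_press_pairs; infer_instance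

-- ===== CLAIM (what is proved, stated in full; the proofs are below) =====
def Claim_equal_calc_press_pairs : Prop := ∀ (p1 : List Int) (p2 : List Int) (p3 : List Int) (p4 : List Int), Dom_calc_press_pairs p1 p2 p3 p4 → Spec_calc_press_pairs p1 p2 p3 p4 (calc_press_pairs p1 p2 p3 p4)

-- ===== LEMMAS AND PROOFS =====

-- one stage preserves the invariant: A's games list is B's offsets rendered as S - off
theorem pvStage_inv (i S : Int) (offs : List Int) (h : offs ≠ []) :
    pvStageA i (offs.map (fun o => S - o))
      = (pvStageB i (S, offs)).2.map (fun o => (pvStageB i (S, offs)).1 - o)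
    ∧ (pvStageB i (S, offs)).2 ≠ [] ∧ (pvStageB i (S, offs)).1 = S + i := by
  rcases hl : offs.getLast? with _ | l
  · exact absurd (List.getLast?_eq_none_iff.mp hl) h
  have hmap : (offs.map (fun o => S - o)).map (fun z => i + z)
      = offs.map (fun o => S + i - o) := by
    rw [List.map_map]; exact List.map_congr_left (fun o _ => by dsimp; ring)
  have hlast : (offs.map (fun o => S + i - o)).getLast? = some (S + i - l) := by
    rw [List.getLast?_map, hl]; rfl
  unfold pvStageA pvStageB
  simp only [hmap, hlast, hl, Option.getD_some]
  split_ifs with hc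
  · refine ⟨?_, by simp, rfl⟩
    simp [List.map_append]
  · exact ⟨rfl, h, rfl⟩

-- the whole fold preserves the invariant
theorem pvFold_inv (z : List (Int × Int × Int × Int)) :
    ∀ (S : Int) (offs : List Int), offs ≠ [] →
    z.foldl (fun games q =>
        pvStageA (pvCmp (min q.1 q.2.1) (min q.2.2.1 q.2.2.2))
          (pvStageA (pvCmp (q.1 + q.2.1) (q.2.2.1 + q.2.2.2)) games))
        (offs.map (fun o => S - o))
      = (let st := z.foldl (fun st q =>
          pvStageB (pvCmp (min q.1 q.2.1) (min q.2.2.1 q.2.2.2))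
            (pvStageB (pvCmp (q.1 + q.2.1) (q.2.2.1 + q.2.2.2)) st)) (S, offs);
         st.2.map (fun o => st.1 - o)) := by
  induction z with
  | nil => intro S offs _; simp
  | cons q rest ih =>
    intro S offs h
    simp only [List.foldl_cons]
    obtain ⟨e1, h1, hS1⟩ := pvStage_inv (pvCmp (q.1 + q.2.1) (q.2.2.1 + q.2.2.2)) S offs h
    set st1 := pvStageB (pvCmp (q.1 + q.2.1) (q.2.2.1 + q.2.2.2)) (S, offs) with hst1
    obtain ⟨e2, h2, _⟩ := pvStage_inv (pvCmp (min q.1 q.2.1) (min q.2.2.1 q.2.2.2)) st1.1 st1.2 h1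
    rw [e1, e2]
    rw [ih (pvStageB (pvCmp (min q.1 q.2.1) (min q.2.2.1 q.2.2.2)) (st1.1, st1.2)).1
          (pvStageB (pvCmp (min q.1 q.2.1) (min q.2.2.1 q.2.2.2)) (st1.1, st1.2)).2 h2]

-- ===== VERDICT (by name: the statement is the Claim_ definition above) =====
theorem calc_press_pairs_spec : Claim_equal_calc_press_pairs := by
  intro p1 p2 p3 p4 _
  unfold Spec_calc_press_pairs calc_press_pairs calc_press_pairs_alt
  simp only [List.zip_map', List.foldl_map]
  have hfn : (fun (games : List Int) (q : Int × Int × Int × Int) =>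
        pvStageA ((fun (x : Int × Int × Int × Int) =>
            match x with
            | (a, b, c, d) => if min a b = min c d then 0 else if min a b < min c d then 1 else -1) q)
          (pvStageA ((fun (x : Int × Int × Int × Int) =>
            match x with
            | (a, b, c, d) => if a + b = c + d then 0 else if a + b < c + d then 1 else -1) q) games))
      = fun (games : List Int) (q : Int × Int × Int × Int) =>
          pvStageA (pvCmp (min q.1 q.2.1) (min q.2.2.1 q.2.2.2))
            (pvStageA (pvCmp (q.1 + q.2.1) (q.2.2.1 + q.2.2.2)) games) := by
    funext games q
    rcases q with ⟨a, b, c, d⟩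
    rfl
  rw [hfn]
  have h := pvFold_inv (pvZip4 p1 p2 p3 p4) 0 [0] (by simp)
  simpa using h
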